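-- pv_equiv track=rewrite | github.com/Mohammedjaasir/RAG_SYSTEM | receipt/extraction/comprehensive_fields/field_extractors/totals_extractor.py | _filter_patterns_by_strategy
-- ===== SOURCE A (Python) =====
-- def _filter_patterns_by_strategy(patterns, strategy_rules, pattern_type):
--     """Filter and prioritize patterns based on extraction strategy."""
--     if not strategy_rules or not patterns:
--         return patterns
--
--     prefer_patterns = strategy_rules.get('prefer_patterns', [])
--     avoid_patterns = strategy_rules.get('avoid_patterns', [])
--
--     if not prefer_patterns and not avoid_patterns:
--         return patterns
--
--     filtered_patterns = []
--     preferred_patterns = []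
--
--     for pattern_config in patterns:
--         pattern_text = pattern_config.get('pattern', '').lower()
--
--         # Check if this pattern should be avoided
--         should_avoid = any(avoid in pattern_text for avoid in avoid_patterns)
--         if should_avoid:
--             continue
--
--         # Check if this pattern is preferred
--         is_preferred = any(prefer in pattern_text for prefer in prefer_patterns)
--         if is_preferred:
--             preferred_patterns.append(pattern_config)
--         else:
--             filtered_patterns.append(pattern_config)
--
--     # Return preferred patterns first, then others
--     return preferred_patterns + filtered_patterns
-- ===== SOURCE B (Python) =====
-- def _filter_patterns_by_strategy(patterns, strategy_rules, pattern_type):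
--     """Filter and prioritize patterns based on extraction strategy."""
--     if not strategy_rules or not patterns:
--         return patterns
--
--     prefer_patterns = strategy_rules.get('prefer_patterns', [])
--     avoid_patterns = strategy_rules.get('avoid_patterns', [])
--
--     if not prefer_patterns and not avoid_patterns:
--         return patterns
--
--     candidates = [pc for pc in patterns
--                   if not any(a in pc.get('pattern', '').lower() for a in avoid_patterns)]
--     # stable sort: preferred patterns first, everything else keeps its original order
--     return sorted(candidates,
--                   key=lambda pc: 0 if any(p in pc.get('pattern', '').lower()
--                                           for p in prefer_patterns) else 1)
-- ===== Notes on version B (the rewrite author's own statement) =====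
-- stated objective: simpler
-- what changed: Replaces the two-accumulator partition loop by a filter comprehension over avoid rules followed by one stable sort keyed 0/1 on preference; stability yields the same preferred-then-rest order.
import Mathlib
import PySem

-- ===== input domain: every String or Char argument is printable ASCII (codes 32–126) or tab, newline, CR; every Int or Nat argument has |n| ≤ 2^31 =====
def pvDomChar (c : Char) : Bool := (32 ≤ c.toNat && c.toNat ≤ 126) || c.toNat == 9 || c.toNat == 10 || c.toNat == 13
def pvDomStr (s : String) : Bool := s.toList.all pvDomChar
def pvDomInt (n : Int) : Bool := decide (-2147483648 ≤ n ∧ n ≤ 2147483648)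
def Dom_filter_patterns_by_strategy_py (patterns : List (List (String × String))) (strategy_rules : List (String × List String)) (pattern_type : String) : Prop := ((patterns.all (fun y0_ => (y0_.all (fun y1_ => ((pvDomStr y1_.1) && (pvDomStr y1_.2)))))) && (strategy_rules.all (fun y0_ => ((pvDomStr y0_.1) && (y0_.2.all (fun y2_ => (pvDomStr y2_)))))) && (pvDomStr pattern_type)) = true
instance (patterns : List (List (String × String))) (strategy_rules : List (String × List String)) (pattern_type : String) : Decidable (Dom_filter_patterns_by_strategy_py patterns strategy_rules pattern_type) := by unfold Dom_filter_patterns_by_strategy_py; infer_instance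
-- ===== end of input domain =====

-- ===== PORT A =====
-- B replaces A's two-accumulator partition loop by a filter plus one stable 0/1-keyed sort (objective: simpler).
def pvText (pc : List (String × String)) : String :=
  PySem.Str.lower (PySem.Dict.getD (PySem.Dict.ofList pc) "pattern" "")

def filter_patterns_by_strategy_py (patterns : List (List (String × String))) (strategy_rules : List (String × List String)) (pattern_type : String) : List (List (String × String)) :=
  if strategy_rules.isEmpty || patterns.isEmpty then patterns
  else
    let prefer_patterns := PySem.Dict.getD (PySem.Dict.ofList strategy_rules) "prefer_patterns" []
    let avoid_patterns := PySem.Dict.getD (PySem.Dict.ofList strategy_rules) "avoid_patterns" []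
    if prefer_patterns.isEmpty && avoid_patterns.isEmpty then patterns
    else
      let r := patterns.foldl (fun (acc : List (List (String × String)) × List (List (String × String))) pattern_config =>
        let pattern_text := pvText pattern_config
        if avoid_patterns.any (fun avoid => PySem.Str.isIn avoid pattern_text) then acc
        else if prefer_patterns.any (fun prefer => PySem.Str.isIn prefer pattern_text) then
          (acc.1 ++ [pattern_config], acc.2)
        else (acc.1, acc.2 ++ [pattern_config])) ([], [])
      r.1 ++ r.2

-- ===== PORT B =====
def filter_patterns_by_strategy_py_alt (patterns : List (List (String × String))) (strategy_rules : List (String × List String)) (pattern_type : String) : List (List (String × String)) :=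
  if strategy_rules.isEmpty || patterns.isEmpty then patterns
  else
    let prefer_patterns := PySem.Dict.getD (PySem.Dict.ofList strategy_rules) "prefer_patterns" []
    let avoid_patterns := PySem.Dict.getD (PySem.Dict.ofList strategy_rules) "avoid_patterns" []
    if prefer_patterns.isEmpty && avoid_patterns.isEmpty then patterns
    else
      let candidates := patterns.filter (fun pc =>
        !(avoid_patterns.any (fun a => PySem.Str.isIn a (pvText pc))))
      PySem.List.sorted candidates
        (fun pc => if prefer_patterns.any (fun p => PySem.Str.isIn p (pvText pc)) then (0 : Int) else 1) false

-- ===== PRECONDITION & SPEC =====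
def Spec_filter_patterns_by_strategy_py (patterns : List (List (String × String))) (strategy_rules : List (String × List String)) (pattern_type : String) (out : List (List (String × String))) : Prop := out = filter_patterns_by_strategy_py_alt patterns strategy_rules pattern_type
instance (patterns : List (List (String × String))) (strategy_rules : List (String × List String)) (pattern_type : String) (out : List (List (String × String))) : Decidable (Spec_filter_patterns_by_strategy_py patterns strategy_rules pattern_type out) := by unfold Spec_filter_patterns_by_strategy_py; infer_instance

-- ===== CLAIM (what is proved, stated in full; the proofs are below) =====
def Claim_equal_filter_patterns_by_strategy_py : Prop := ∀ (patterns : List (List (String × String))) (strategy_rules : List (String × List String)) (pattern_type : String), Dom_filter_patterns_by_strategy_py patterns strategy_rules pattern_type → Spec_filter_patterns_by_strategy_py patterns strategy_rules pattern_type (filter_patterns_by_strategy_py patterns strategy_rules pattern_type)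

-- ===== LEMMAS AND PROOFS =====

-- inserting a key-0 element into "all-key-0 ++ all-key-1" puts it between the blocks
lemma insert_zero {α : Type} (p : α → Bool) (x : α) (hx : p x = true) :
    ∀ (A B : List α), (∀ a ∈ A, p a = true) → (∀ b ∈ B, p b = false) →
    PySem.List.insertBy (fun a b => decide ((if p a then (0 : Int) else 1) < (if p b then (0 : Int) else 1))) x (A ++ B) = A ++ x :: B := by
  intro A
  induction A with
  | nil =>
    intro B _ hB
    cases B with
    | nil => simp [PySem.List.insertBy]
    | cons b bs =>
      have hb : p b = false := hB b (by simp)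
      simp [PySem.List.insertBy, hx, hb]
  | cons a as ih =>
    intro B hA hB
    have ha : p a = true := hA a (by simp)
    simp only [List.cons_append, PySem.List.insertBy, hx, ha]
    simp [ih B (fun a h => hA a (by simp [h])) hB]

-- inserting a key-1 element appends it at the end
lemma insert_one {α : Type} (p : α → Bool) (x : α) (hx : p x = false) :
    ∀ (L : List α),
    PySem.List.insertBy (fun a b => decide ((if p a then (0 : Int) else 1) < (if p b then (0 : Int) else 1))) x L = L ++ [x] := by
  intro L
  induction L with
  | nil => simp [PySem.List.insertBy]
  | cons a as ih =>
    by_cases ha : p a = true <;>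
      simp_all [PySem.List.insertBy]

-- the insertion-sort fold over a 0/1 key keeps the two blocks, each in input order
lemma foldl_insert_partition {α : Type} (p : α → Bool) :
    ∀ (xs : List α) (A B : List α), (∀ a ∈ A, p a = true) → (∀ b ∈ B, p b = false) →
    xs.foldl (fun acc x => PySem.List.insertBy (fun a b => decide ((if p a then (0 : Int) else 1) < (if p b then (0 : Int) else 1))) x acc) (A ++ B)
      = (A ++ xs.filter p) ++ (B ++ xs.filter (fun x => !p x)) := by
  intro xs
  induction xs with
  | nil => intro A B _ _; simp
  | cons x xs ih =>
    intro A B hA hB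
    by_cases hx : p x = true
    · rw [List.foldl_cons, insert_zero p x hx A B hA hB]
      have hset : A ++ x :: B = (A ++ [x]) ++ B := by simp
      have hA' : ∀ a ∈ A ++ [x], p a = true := by
        intro a h
        rcases List.mem_append.mp h with h | h
        · exact hA a h
        · simp at h; simpa [h]
      rw [hset, ih (A ++ [x]) B hA' hB]
      simp [hx]
    · have hx' : p x = false := by simpa using hx
      rw [List.foldl_cons, insert_one p x hx' (A ++ B), List.append_assoc]
      have hB' : ∀ b ∈ B ++ [x], p b = false := by
        intro b h
        rcases List.mem_append.mp h with h | h
        · exact hB b h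
        · simp at h; simpa [h]
      rw [ih A (B ++ [x]) hA hB']
      simp [hx']

-- a stable sort on a two-valued 0/1 key is exactly "trues first, then falses", each in order
lemma sorted_two_valued {α : Type} (p : α → Bool) (xs : List α) :
    PySem.List.sorted xs (fun x => if p x then (0 : Int) else 1) false
      = xs.filter p ++ xs.filter (fun x => !p x) := by
  rw [PySem.List.sorted_eq_foldl_insertBy]
  have := foldl_insert_partition p xs [] [] (by simp) (by simp)
  simpa using this

-- A's two-accumulator loop computes the same two blocks
lemma foldl_accumulate {α : Type} (avoidP prefP : α → Bool) :
    ∀ (xs : List α) (P F : List α),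
    xs.foldl (fun (acc : List α × List α) x =>
        if avoidP x then acc
        else if prefP x then (acc.1 ++ [x], acc.2)
        else (acc.1, acc.2 ++ [x])) (P, F)
      = (P ++ (xs.filter (fun x => !avoidP x)).filter prefP,
         F ++ (xs.filter (fun x => !avoidP x)).filter (fun x => !prefP x)) := by
  intro xs
  induction xs with
  | nil => intro P F; simp
  | cons x xs ih =>
    intro P F
    by_cases hav : avoidP x = true
    · simp [List.foldl_cons, hav, ih]
    · have hav' : avoidP x = false := by simpa using hav
      by_cases hp : prefP x = true
      · simp [List.foldl_cons, hav', hp, ih]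
      · have hp' : prefP x = false := by simpa using hp
        simp [List.foldl_cons, hav', hp', ih]

-- ===== VERDICT (by name: the statement is the Claim_ definition above) =====
theorem filter_patterns_by_strategy_py_spec : Claim_equal_filter_patterns_by_strategy_py := by
  intro patterns strategy_rules pattern_type _
  unfold Spec_filter_patterns_by_strategy_py
  unfold filter_patterns_by_strategy_py filter_patterns_by_strategy_py_alt
  by_cases h1 : strategy_rules.isEmpty || patterns.isEmpty
  · simp [h1]
  · simp only [h1, if_false, Bool.false_eq_true]
    set prefer_patterns := PySem.Dict.getD (PySem.Dict.ofList strategy_rules) "prefer_patterns" [] with hpref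
    set avoid_patterns := PySem.Dict.getD (PySem.Dict.ofList strategy_rules) "avoid_patterns" [] with havd
    by_cases h2 : prefer_patterns.isEmpty && avoid_patterns.isEmpty
    · simp [h2]
    · simp only [h2, if_false, Bool.false_eq_true]
      rw [sorted_two_valued (fun pc => prefer_patterns.any (fun p => PySem.Str.isIn p (pvText pc)))]
      rw [foldl_accumulate (fun pc => avoid_patterns.any (fun a => PySem.Str.isIn a (pvText pc)))
            (fun pc => prefer_patterns.any (fun p => PySem.Str.isIn p (pvText pc))) patterns [] []]
      simp [List.filter_filter]
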